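-- pv_equiv track=rewrite | github.com/Kosmorro/kosmorro | kosmorrolib/dumper.py | _remove_section
-- ===== SOURCE A (Python) =====
-- def _remove_section(document: str, section: str):
--     begin_section_tag = '%%%%%% BEGIN-%s-SECTION' % section.upper()
--     end_section_tag = '%%%%%% END-%s-SECTION' % section.upper()
--
--     document = document.split('\n')
--     new_document = []
--
--     ignore_line = False
--     for line in document:
--         if begin_section_tag in line or end_section_tag in line:
--             ignore_line = not ignore_line
--             continue
--         if ignore_line:
--             continue
--         new_document.append(line)
--
--     return '\n'.join(new_document)
-- ===== SOURCE B (Python) =====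
-- def _remove_section(document: str, section: str):
--     begin_section_tag = '%%%%%% BEGIN-%s-SECTION' % section.upper()
--     end_section_tag = '%%%%%% END-%s-SECTION' % section.upper()
--
--     lines = document.split('\n')
--     # Phase 1: boolean tag mask and exclusive prefix XOR-parity over it.
--     is_tag = [begin_section_tag in line or end_section_tag in line for line in lines]
--     parity = []
--     p = False
--     for t in is_tag:
--         parity.append(p)
--         p ^= t
--     # Phase 2: keep a line iff it is not a tag line and its preceding parity is even.
--     return '\n'.join(line for line, t, pb in zip(lines, is_tag, parity)
--                      if not t and not pb)
-- ===== Notes on version B (the rewrite author's own statement) =====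
-- stated objective: alternative
-- what changed: Replaces the single mutable-flag state-machine loop (toggle ignore_line, conditional append) with a two-phase decomposition: first build a boolean tag mask and its exclusive prefix XOR-parity array, then filter the zipped lines in a separate pass.
import Mathlib
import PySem

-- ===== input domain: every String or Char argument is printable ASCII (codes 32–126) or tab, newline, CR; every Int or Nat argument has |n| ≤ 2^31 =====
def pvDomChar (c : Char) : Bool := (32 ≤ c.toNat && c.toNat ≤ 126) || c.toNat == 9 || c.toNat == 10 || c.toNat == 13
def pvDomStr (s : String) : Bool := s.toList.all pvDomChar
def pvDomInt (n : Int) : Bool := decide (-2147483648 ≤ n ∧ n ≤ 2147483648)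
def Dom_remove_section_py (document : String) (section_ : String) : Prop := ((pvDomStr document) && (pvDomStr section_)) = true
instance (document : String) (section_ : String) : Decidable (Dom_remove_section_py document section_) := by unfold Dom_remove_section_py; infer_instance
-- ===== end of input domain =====

-- ===== PORT A =====
-- B replaces A's mutable-flag state-machine loop with a two-phase mask/parity-then-filter decomposition (same cost).
-- loop of A: one pass, toggling the ignore flag, appending kept lines to an accumulator
def pvLoopA (bt et : List Char) : List (List Char) → Bool → List (List Char) → List (List Char)
  | [], _, acc => acc
  | l :: ls, ig, acc =>
    if PySem.Chars.isIn bt l || PySem.Chars.isIn et l then pvLoopA bt et ls (!ig) acc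
    else if ig then pvLoopA bt et ls ig acc
    else pvLoopA bt et ls ig (acc ++ [l])

def remove_section_py (document : String) (section_ : String) : String :=
  let bt := "%%% BEGIN-".toList ++ PySem.Chars.upper section_.toList ++ "-SECTION".toList
  let et := "%%% END-".toList ++ PySem.Chars.upper section_.toList ++ "-SECTION".toList
  String.ofList (PySem.Chars.join ['\n'] (pvLoopA bt et (PySem.Chars.splitOn document.toList ['\n']) false []))

-- ===== PORT B =====
def pvIsTag (bt et : List Char) (l : List Char) : Bool :=
  PySem.Chars.isIn bt l || PySem.Chars.isIn et l

-- exclusive prefix XOR-parity over the tag mask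
def pvParity : List Bool → Bool → List Bool
  | [], _ => []
  | t :: ts, p => p :: pvParity ts (xor p t)

def remove_section_py_alt (document : String) (section_ : String) : String :=
  let bt := "%%% BEGIN-".toList ++ PySem.Chars.upper section_.toList ++ "-SECTION".toList
  let et := "%%% END-".toList ++ PySem.Chars.upper section_.toList ++ "-SECTION".toList
  let lines := PySem.Chars.splitOn document.toList ['\n']
  let mask := lines.map (pvIsTag bt et)
  let kept := ((lines.zip mask).zip (pvParity mask false)).filterMap
    (fun lp => if !lp.1.2 && !lp.2 then some lp.1.1 else none)
  String.ofList (PySem.Chars.join ['\n'] kept)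

-- ===== PRECONDITION & SPEC =====
def Spec_remove_section_py (document : String) (section_ : String) (out : String) : Prop := out = remove_section_py_alt document section_
instance (document : String) (section_ : String) (out : String) : Decidable (Spec_remove_section_py document section_ out) := by unfold Spec_remove_section_py; infer_instance

-- ===== CLAIM (what is proved, stated in full; the proofs are below) =====
def Claim_equal_remove_section_py : Prop := ∀ (document : String) (section_ : String), Dom_remove_section_py document section_ → Spec_remove_section_py document section_ (remove_section_py document section_)

-- ===== LEMMAS AND PROOFS =====

-- ===== VERDICT (by name: the statement is the Claim_ definition above) =====
-- the state-machine loop equals the mask/parity filter, for any initial flag and accumulator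
theorem pvLoopA_eq (bt et : List Char) (ls : List (List Char)) (ig : Bool) (acc : List (List Char)) :
    pvLoopA bt et ls ig acc =
      acc ++ ((ls.zip (ls.map (pvIsTag bt et))).zip (pvParity (ls.map (pvIsTag bt et)) ig)).filterMap
        (fun lp => if !lp.1.2 && !lp.2 then some lp.1.1 else none) := by
  induction ls generalizing ig acc with
  | nil => simp [pvLoopA, pvParity]
  | cons l ls ih =>
    by_cases ht : pvIsTag bt et l
    · simp only [pvLoopA, pvIsTag] at ht ⊢
      rw [if_pos ht, ih]
      simp [pvParity, pvIsTag, List.filterMap_cons, ht]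
    · simp only [pvLoopA, pvIsTag] at ht ⊢
      rw [if_neg (by simpa using ht)]
      cases ig with
      | false => rw [if_neg (by simp), ih]; simp [pvParity, pvIsTag, List.filterMap_cons, ht]
      | true => rw [if_pos rfl, ih]; simp [pvParity, pvIsTag, List.filterMap_cons, ht]

theorem remove_section_py_spec : Claim_equal_remove_section_py := by
  intro document section_ _
  unfold Spec_remove_section_py remove_section_py remove_section_py_alt
  simp only [pvLoopA_eq, List.nil_append]
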